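-- pv_equiv track=rewrite | github.com/gorgonetics/Gorgonetics | scripts/generate_gene_templates.py | generate_chromosome_template
-- ===== SOURCE A (Python) =====
-- def generate_block_letters(num_blocks: int) -> list[str]:
--     """
--     Generate block letters (A, B, C, ..., Z, AA, AB, ...).
--
--     Args:
--         num_blocks: Number of blocks needed
--
--     Returns:
--         List of block letter strings
--     """
--     letters: list[str] = []
--
--     # First 26 blocks use single letters A-Z
--     for i in range(min(num_blocks, 26)):
--         letters.append(chr(ord("A") + i))
--
--     # If more than 26 blocks, use double letters AA, AB, AC, etc.
--     remaining = num_blocks - 26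
--     if remaining > 0:
--         for i in range(remaining):
--             first_letter = chr(ord("A") + (i // 26))
--             second_letter = chr(ord("A") + (i % 26))
--             letters.append(first_letter + second_letter)
--
--     return letters
--
-- def generate_chromosome_template(chr_num: str, gene_data: str) -> list[dict[str, str]]:
--     """
--     Generate a JSON template for a single chromosome.
--
--     Args:
--         chr_num: Chromosome number (e.g., "01", "02")
--         gene_data: Gene data string
--
--     Returns:
--         List of gene dictionaries
--     """
--     # Split gene data into blocks
--     blocks = [block for block in gene_data.split() if block and len(block) >= 2]
--     block_letters = generate_block_letters(len(blocks))
--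
--     genes: list[dict[str, str]] = []
--
--     for i, block_letter in enumerate(block_letters):
--         # Get the actual block data to determine how many genes it has
--         block_data = blocks[i] if i < len(blocks) else ""
--         num_genes_in_block = len(block_data)
--
--         for gene_pos in range(1, num_genes_in_block + 1):  # Only create genes based on actual data
--             gene_id = f"{chr_num}{block_letter}{gene_pos}"
--             gene_entry = {
--                 "gene": gene_id,
--                 "effectDominant": "None",
--                 "effectRecessive": "None",
--                 "appearance": "|String for me to fill in|",
--                 "notes": "|String for me to fill in|",
--             }
--             genes.append(gene_entry)
--
--     return genes
-- ===== SOURCE B (Python) =====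
-- def generate_chromosome_template(chr_num: str, gene_data: str) -> list[dict[str, str]]:
--     # Single streaming pass: no filtered list, no letter table, no index division.
--     # The block label is carried as numeric letter codes (hi, lo) advanced like a
--     # counter with carry: A..Z, then AA, AB, ...  hi is None while labels are single.
--     genes: list[dict[str, str]] = []
--     hi = None
--     lo = ord("A")
--     for block in gene_data.split():
--         if len(block) < 2:
--             continue
--         label = chr(lo) if hi is None else chr(hi) + chr(lo)
--         for pos, _ in enumerate(block, 1):
--             genes.append({
--                 "gene": f"{chr_num}{label}{pos}",
--                 "effectDominant": "None",
--                 "effectRecessive": "None",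
--                 "appearance": "|String for me to fill in|",
--                 "notes": "|String for me to fill in|",
--             })
--         if lo < ord("Z"):
--             lo += 1
--         elif hi is None:
--             hi, lo = ord("A"), ord("A")
--         else:
--             hi, lo = hi + 1, ord("A")
--     return genes
-- ===== Notes on version B (the rewrite author's own statement) =====
-- stated objective: alternative
-- what changed: Replaces A's precomputed base-26 letter table (two build loops plus enumerate over the table with indexed block lookup) by a single streaming pass over the split words that skips short ones and carries the block label as a pair of numeric letter codes advanced like a counter with carry; gene positions come from enumerate over the block's characters instead of range(len).
import Mathlib
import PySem

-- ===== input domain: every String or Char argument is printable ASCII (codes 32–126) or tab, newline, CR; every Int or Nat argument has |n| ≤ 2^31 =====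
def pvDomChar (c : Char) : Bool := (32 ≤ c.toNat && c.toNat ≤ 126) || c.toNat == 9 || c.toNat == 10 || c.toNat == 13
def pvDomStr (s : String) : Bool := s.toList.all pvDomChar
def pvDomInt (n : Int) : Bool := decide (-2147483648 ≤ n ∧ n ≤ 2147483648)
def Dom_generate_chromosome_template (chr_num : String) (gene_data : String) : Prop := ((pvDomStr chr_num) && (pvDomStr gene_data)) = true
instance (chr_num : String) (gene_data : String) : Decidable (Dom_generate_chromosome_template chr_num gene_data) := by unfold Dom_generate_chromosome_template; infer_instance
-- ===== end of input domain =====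

-- B replaces A's precomputed letter table + indexed enumerate by one streaming pass carrying the block label as numeric letter codes with carry (objective: alternative).


-- ===== PORT A =====
-- helper generate_block_letters; 'first_letter + second_letter' is built as the two-char string directly (exact)
def generate_block_letters (num_blocks : Int) : List String :=
  let letters : List String :=
    (PySem.List.pyRange 0 (min num_blocks 26) 1).foldl
      (fun acc i => acc ++ [String.ofList [Char.ofNat (Int.toNat (65 + i))]]) []
  let remaining := num_blocks - 26
  if remaining > 0 then
    (PySem.List.pyRange 0 remaining 1).foldl
      (fun acc i => acc ++ [String.ofList [Char.ofNat (Int.toNat (65 + PySem.Int.floordiv i 26)),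
                                       Char.ofNat (Int.toNat (65 + PySem.Int.mod i 26))]]) letters
  else letters

-- 'blocks[i] if i < len(blocks) else ""' ported via pyGetD (exact: i from enumerate is ≥ 0)
def generate_chromosome_template (chr_num : String) (gene_data : String) : List (List (String × String)) :=
  let blocks := (PySem.Str.split₀ gene_data).filter (fun b => !(b == "") && decide (2 ≤ PySem.Str.len b))
  let block_letters := generate_block_letters (blocks.length : Int)
  (PySem.List.enumerate block_letters).foldl (fun acc p =>
    let block_data := if p.1 < (blocks.length : Int) then PySem.List.pyGetD blocks p.1 "" else ""
    let num_genes_in_block := PySem.Str.len block_data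
    (PySem.List.pyRange 1 (num_genes_in_block + 1) 1).foldl (fun acc2 pos =>
      acc2 ++ [[("gene", chr_num ++ p.2 ++ PySem.Int.toStr pos),
                ("effectDominant", "None"),
                ("effectRecessive", "None"),
                ("appearance", "|String for me to fill in|"),
                ("notes", "|String for me to fill in|")]]) acc) []

-- ===== PORT B =====
-- Source B: one foldl over the split words; state = (genes, hi, lo) with hi : Option Int (None while single letters).
-- 'for pos, _ in enumerate(block, 1)' iterates the block's characters with a 1-based counter: enumerate block.toList 1.
def generate_chromosome_template_alt (chr_num : String) (gene_data : String) : List (List (String × String)) :=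
  ((PySem.Str.split₀ gene_data).foldl
    (fun (st : List (List (String × String)) × Option Int × Int) block =>
      if PySem.Str.len block < 2 then st
      else
        let label : String :=
          match st.2.1 with
          | none => String.ofList [Char.ofNat st.2.2.toNat]
          | some h => String.ofList [Char.ofNat h.toNat, Char.ofNat st.2.2.toNat]
        let genes := (PySem.List.enumerate block.toList 1).foldl
          (fun g p => g ++ [[("gene", chr_num ++ label ++ PySem.Int.toStr p.1),
                             ("effectDominant", "None"),
                             ("effectRecessive", "None"),
                             ("appearance", "|String for me to fill in|"),
                             ("notes", "|String for me to fill in|")]]) st.1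
        if st.2.2 < 90 then (genes, st.2.1, st.2.2 + 1)
        else match st.2.1 with
             | none => (genes, some 65, 65)
             | some h => (genes, some (h + 1), 65))
    ([], none, 65)).1

-- ===== PRECONDITION & SPEC =====
def Spec_generate_chromosome_template (chr_num : String) (gene_data : String) (out : List (List (String × String))) : Prop := out = generate_chromosome_template_alt chr_num gene_data
instance (chr_num : String) (gene_data : String) (out : List (List (String × String))) : Decidable (Spec_generate_chromosome_template chr_num gene_data out) := by unfold Spec_generate_chromosome_template; infer_instance

-- ===== CLAIM (what is proved, stated in full; the proofs are below) =====
def Claim_equal_generate_chromosome_template : Prop := ∀ (chr_num : String) (gene_data : String), Dom_generate_chromosome_template chr_num gene_data → Spec_generate_chromosome_template chr_num gene_data (generate_chromosome_template chr_num gene_data)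

-- ===== LEMMAS AND PROOFS =====

-- one gene row
def pvRow (chr_num label : String) (pos : Int) : List (String × String) :=
  [("gene", chr_num ++ label ++ PySem.Int.toStr pos),
   ("effectDominant", "None"),
   ("effectRecessive", "None"),
   ("appearance", "|String for me to fill in|"),
   ("notes", "|String for me to fill in|")]

-- the label of block index k, as A's table produces it
def pvLetterN (k : Nat) : String :=
  if k < 26 then String.ofList [Char.ofNat (65 + k)]
  else String.ofList [Char.ofNat (65 + (k - 26) / 26), Char.ofNat (65 + (k - 26) % 26)]

-- B's numeric state at block index k
def pvState (k : Nat) : Option Int × Int :=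
  if k < 26 then (none, 65 + (k : Int))
  else (some (65 + ((k - 26) / 26 : Nat) : Int), (65 + ((k - 26) % 26 : Nat) : Int))

-- common specification: genes of the blocks bs, starting at block index k
def pvSpec (chr_num : String) (k : Nat) (bs : List String) : List (List (String × String)) :=
  match bs with
  | [] => []
  | b :: rest =>
    (PySem.List.pyRange 1 (PySem.Str.len b + 1) 1).map (fun pos => pvRow chr_num (pvLetterN k) pos)
      ++ pvSpec chr_num (k + 1) rest

-- the two filters agree: a string of length ≥ 2 is nonempty
lemma pv_filter_eq (xs : List String) :
    xs.filter (fun b => !(b == "") && decide (2 ≤ PySem.Str.len b))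
      = xs.filter (fun b => decide (2 ≤ PySem.Str.len b)) := by
  apply List.filter_congr
  intro b _
  by_cases hb : b = ""
  · subst hb; decide
  · simp [hb]

-- A's letter table is the list of pvLetterN
lemma pv_block_letters_eq (n : Nat) :
    generate_block_letters (n : Int) = (List.range n).map pvLetterN := by
  unfold generate_block_letters
  by_cases h : n ≤ 26
  · have hmin : min (n : Int) 26 = (n : Int) := by omega
    have hrem : ¬ ((n : Int) - 26 > 0) := by omega
    simp only [hmin, if_neg hrem, PySem.List.pyRange_zero_natCast, List.foldl_map,
      PySem.List.foldl_append_singleton_eq_map, List.nil_append]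
    apply List.map_congr_left
    intro k hk
    have hk26 : k < 26 := by have := List.mem_range.mp hk; omega
    have ht : (65 + (k : Int)).toNat = 65 + k := by omega
    simp only [pvLetterN, if_pos hk26, ht]
  · have hmin : min (n : Int) 26 = (26 : Int) := by omega
    have hc : (n : Int) - 26 = ((n - 26 : Nat) : Int) := by omega
    have hrem : ((n - 26 : Nat) : Int) > 0 := by omega
    rw [hmin, hc, if_pos hrem, show (26 : Int) = ((26 : Nat) : Int) by norm_num]
    simp only [PySem.List.pyRange_zero_natCast, List.foldl_map,
      PySem.List.foldl_append_singleton_eq_map, List.nil_append]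
    conv_rhs => rw [show n = 26 + (n - 26) by omega]
    rw [List.range_add, List.map_append]
    congr 1
    rw [List.map_map]
    apply List.map_congr_left
    intro k _
    simp only [Function.comp_apply, PySem.Int.floordiv_natCast, PySem.Int.mod_natCast]
    have h1 : ¬ (26 + k < 26) := by omega
    have h2 : (65 + ((k / 26 : Nat) : Int)).toNat = 65 + (26 + k - 26) / 26 := by omega
    have h3 : (65 + ((k % 26 : Nat) : Int)).toNat = 65 + (26 + k - 26) % 26 := by omega
    simp only [pvLetterN, if_neg h1, h2, h3]

-- pvSpec as a flatMap over indices
lemma pv_spec_flatMap (chr_num : String) (bs : List String) : ∀ (k : Nat),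
    pvSpec chr_num k bs
      = (List.range bs.length).flatMap (fun j =>
          (PySem.List.pyRange 1 (PySem.Str.len (bs.getD j "") + 1) 1).map
            (fun pos => pvRow chr_num (pvLetterN (k + j)) pos)) := by
  induction bs with
  | nil => intro k; simp [pvSpec]
  | cons b rest ih =>
    intro k
    rw [List.length_cons, show rest.length + 1 = 1 + rest.length by omega, List.range_add,
      List.flatMap_append]
    simp only [pvSpec, ih (k + 1), List.range_one, List.flatMap_cons, List.flatMap_nil,
      List.append_nil, List.getD_cons_zero, Nat.add_zero, List.flatMap_map]
    congr 1
    apply List.flatMap_congr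
    intro j _
    rw [show 1 + j = j + 1 from by omega]
    simp only [List.getD_cons_succ]
    rw [show k + 1 + j = k + (j + 1) from by omega]

-- A equals pvSpec on the filtered blocks
lemma pv_A_eq (chr_num gene_data : String) :
    generate_chromosome_template chr_num gene_data
      = pvSpec chr_num 0 ((PySem.Str.split₀ gene_data).filter (fun b => decide (2 ≤ PySem.Str.len b))) := by
  unfold generate_chromosome_template
  rw [pv_filter_eq]
  set bs := (PySem.Str.split₀ gene_data).filter (fun b => decide (2 ≤ PySem.Str.len b)) with hbs
  rw [pv_spec_flatMap]
  simp only [pv_block_letters_eq, PySem.List.enumerate_eq_map_pyRange _ ("" : String),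
    List.foldl_map, PySem.List.foldl_append_singleton_eq_map,
    PySem.List.foldl_append_eq_flatMap, List.nil_append, PySem.List.len,
    List.length_map, List.length_range]
  rw [PySem.List.pyRange_zero_natCast, List.flatMap_map]
  apply List.flatMap_congr
  intro k hk
  have hkn : k < bs.length := List.mem_range.mp hk
  have hjn : (k : Int) < (bs.length : Int) := by exact_mod_cast hkn
  rw [PySem.List.pyGetD_natCast, PySem.List.getD_map_range _ _ _ _ hkn, if_pos hjn,
    PySem.List.pyGetD_natCast]
  simp [pvRow, PySem.Str.len]

-- the label B builds from pvState k is pvLetterN k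
lemma pv_state_label (k : Nat) :
    (match (pvState k).1 with
     | none => String.ofList [Char.ofNat (pvState k).2.toNat]
     | some h => String.ofList [Char.ofNat h.toNat, Char.ofNat (pvState k).2.toNat]) = pvLetterN k := by
  by_cases hk : k < 26
  · have ht : (65 + (k : Int)).toNat = 65 + k := by omega
    simp [pvState, pvLetterN, hk, ht]
  · have h2 : (((65 : Int) + ((k - 26 : Nat) : Int) / 26)).toNat = 65 + (k - 26) / 26 := by omega
    have h3 : (((65 : Int) + ((k - 26 : Nat) : Int) % 26)).toNat = 65 + (k - 26) % 26 := by omega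
    simp [pvState, pvLetterN, hk]
    rw [h2, h3]

-- B's carry step advances pvState k to pvState (k+1)
lemma pv_state_succ (k : Nat) (genes : List (List (String × String))) :
    (if (pvState k).2 < 90 then (genes, (pvState k).1, (pvState k).2 + 1)
     else match (pvState k).1 with
          | none => (genes, some (65 : Int), (65 : Int))
          | some h => (genes, some (h + 1), (65 : Int))) = (genes, pvState (k + 1)) := by
  by_cases hk : k < 25
  · have hlt : (65 + (k : Int)) < 90 := by omega
    have hk1 : k < 26 := by omega
    have hk2 : k + 1 < 26 := by omega
    simp only [pvState, if_pos hk1, if_pos hk2, if_pos hlt, Prod.mk.injEq]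
    refine ⟨trivial, trivial, by omega⟩
  · by_cases hk25 : k = 25
    · subst hk25; simp [pvState]
    · have hk26 : ¬ (k < 26) := by omega
      have hk26' : ¬ (k + 1 < 26) := by omega
      by_cases hm : (k - 26) % 26 < 25
      · have hlt : (65 + (((k - 26) % 26 : Nat) : Int)) < 90 := by omega
        simp only [pvState, if_neg hk26, if_neg hk26', if_pos hlt, Prod.mk.injEq,
          Option.some.injEq]
        refine ⟨trivial, by omega, by omega⟩
      · have hlt : ¬ ((65 + (((k - 26) % 26 : Nat) : Int)) < 90) := by
          have hm25 : (k - 26) % 26 = 25 := by omega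
          rw [hm25]; norm_num
        simp only [pvState, if_neg hk26, if_neg hk26', if_neg hlt, Prod.mk.injEq,
          Option.some.injEq]
        refine ⟨trivial, by omega, by omega⟩

-- B's loop, from any accumulator and any block index
lemma pv_B_go (chr_num : String) (ws : List String) : ∀ (acc : List (List (String × String))) (k : Nat),
    (ws.foldl
      (fun (st : List (List (String × String)) × Option Int × Int) block =>
        if PySem.Str.len block < 2 then st
        else
          let label : String :=
            match st.2.1 with
            | none => String.ofList [Char.ofNat st.2.2.toNat]
            | some h => String.ofList [Char.ofNat h.toNat, Char.ofNat st.2.2.toNat]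
          let genes := (PySem.List.enumerate block.toList 1).foldl
            (fun g p => g ++ [[("gene", chr_num ++ label ++ PySem.Int.toStr p.1),
                               ("effectDominant", "None"),
                               ("effectRecessive", "None"),
                               ("appearance", "|String for me to fill in|"),
                               ("notes", "|String for me to fill in|")]]) st.1
          if st.2.2 < 90 then (genes, st.2.1, st.2.2 + 1)
          else match st.2.1 with
               | none => (genes, some 65, 65)
               | some h => (genes, some (h + 1), 65))
      (acc, pvState k)).1
    = acc ++ pvSpec chr_num k (ws.filter (fun b => decide (2 ≤ PySem.Str.len b))) := by
  induction ws with
  | nil => intro acc k; simp [pvSpec]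
  | cons b rest ih =>
    intro acc k
    by_cases hb : PySem.Str.len b < 2
    · have hf : ¬ (2 ≤ PySem.Str.len b) := by omega
      simp only [List.foldl_cons, List.filter_cons, if_pos hb, decide_eq_true_eq, hf,
        if_false, ih]
    · have hf : 2 ≤ PySem.Str.len b := by omega
      simp only [List.foldl_cons, List.filter_cons, if_neg hb, decide_eq_true_eq, hf, if_true]
      rw [pv_state_label, PySem.List.foldl_append_singleton_eq_map, pv_state_succ, ih, pvSpec,
        List.append_assoc]
      congr 2
      have : (PySem.List.enumerate b.toList 1).map
          (fun p => pvRow chr_num (pvLetterN k) p.1)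
        = ((PySem.List.enumerate b.toList 1).map (fun p => p.1)).map
            (fun pos => pvRow chr_num (pvLetterN k) pos) := by
        rw [List.map_map]; rfl
      rw [show (fun (p : Int × Char) =>
            [("gene", chr_num ++ pvLetterN k ++ PySem.Int.toStr p.1),
             ("effectDominant", "None"),
             ("effectRecessive", "None"),
             ("appearance", "|String for me to fill in|"),
             ("notes", "|String for me to fill in|")])
          = (fun (p : Int × Char) => pvRow chr_num (pvLetterN k) p.1) from rfl, this,
        PySem.List.map_fst_enumerate]
      congr 2
      simp [PySem.Str.len]
      omega

-- ===== VERDICT (by name: the statement is the Claim_ definition above) =====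
theorem generate_chromosome_template_spec : Claim_equal_generate_chromosome_template := by
  intro chr_num gene_data _
  unfold Spec_generate_chromosome_template
  rw [pv_A_eq]
  unfold generate_chromosome_template_alt
  rw [show ((none : Option Int), (65 : Int)) = pvState 0 from by simp [pvState], pv_B_go]
  simp
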